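-- pv_equiv track=rewrite | github.com/whmc76/RoughCut | src/roughcut/review/domain_glossaries.py | select_primary_subject_domain
-- ===== SOURCE A (Python) =====
-- _CANONICAL_DOMAIN_ALIASES: dict[str, str] = {
--     "digital": "tech",
--     "software": "ai",
--     "coding": "ai",
--     "gear": "edc",
--     "knife": "edc",
--     "flashlight": "edc",
--     "lighter": "edc",
--     "toy": "edc",
--     "bag": "functional",
--     "functional_wear": "functional",
--     "tool": "tools",
-- }
--
-- def normalize_subject_domain(value: str | None) -> str | None:
--     normalized = str(value or "").strip().lower()
--     if not normalized:
--         return None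
--     return _CANONICAL_DOMAIN_ALIASES.get(normalized, normalized)
--
-- def canonicalize_domains(domains: list[str] | tuple[str, ...] | set[str] | None) -> list[str]:
--     ordered: list[str] = []
--     seen: set[str] = set()
--     for domain in domains or []:
--         canonical = normalize_subject_domain(domain)
--         if canonical and canonical not in seen:
--             seen.add(canonical)
--             ordered.append(canonical)
--     if "functional" in seen:
--         ordered = [domain for domain in ordered if domain != "edc"]
--         seen.discard("edc")
--     if "tools" in seen:
--         ordered = [domain for domain in ordered if domain != "edc"]
--         seen.discard("edc")
--     return ordered
--
-- def select_primary_subject_domain(domains: list[str] | tuple[str, ...] | set[str] | None) -> str | None: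
--     scores: dict[str, int] = {}
--     for domain in domains or []:
--         normalized = str(domain or "").strip().lower()
--         canonical = normalize_subject_domain(normalized)
--         if not canonical:
--             continue
--         weight = 1
--         if normalized in {"bag", "functional_wear"}:
--             weight = 4
--         elif normalized in {"tools", "tool"}:
--             weight = 4
--         elif normalized in {"ai", "coding", "software"}:
--             weight = 4
--         elif normalized in {"tech", "digital"}:
--             weight = 4
--         elif normalized in {"outdoor", "tactical"}:
--             weight = 3
--         elif normalized in {"knife", "flashlight", "lighter", "toy", "edc"}:
--             weight = 3
--         elif normalized == "gear":
--             weight = 1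
--         scores[canonical] = scores.get(canonical, 0) + weight
--
--     if not scores:
--         canonical = canonicalize_domains(domains)
--         return canonical[0] if canonical else None
--
--     priority = {
--         "functional": 6,
--         "tools": 5,
--         "ai": 4,
--         "tech": 3,
--         "edc": 3,
--         "outdoor": 2,
--         "food": 1,
--         "travel": 1,
--         "finance": 1,
--         "news": 1,
--         "sports": 1,
--     }
--     ranked = sorted(scores.items(), key=lambda item: (-item[1], -priority.get(item[0], 0), item[0]))
--     return ranked[0][0]
-- ===== SOURCE B (Python) =====
-- _DOMAIN_ALIASES = {
--     "digital": "tech",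
--     "software": "ai",
--     "coding": "ai",
--     "gear": "edc",
--     "knife": "edc",
--     "flashlight": "edc",
--     "lighter": "edc",
--     "toy": "edc",
--     "bag": "functional",
--     "functional_wear": "functional",
--     "tool": "tools",
-- }
--
-- _KEY_WEIGHTS = {
--     "bag": 4, "functional_wear": 4,
--     "tools": 4, "tool": 4,
--     "ai": 4, "coding": 4, "software": 4,
--     "tech": 4, "digital": 4,
--     "outdoor": 3, "tactical": 3,
--     "knife": 3, "flashlight": 3, "lighter": 3, "toy": 3, "edc": 3,
-- }
--
-- _DOMAIN_PRIORITY = {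
--     "functional": 6, "tools": 5, "ai": 4, "tech": 3, "edc": 3,
--     "outdoor": 2, "food": 1, "travel": 1, "finance": 1, "news": 1, "sports": 1,
-- }
--
--
-- def select_primary_subject_domain(domains):
--     scores = {}
--     for domain in domains or []:
--         key = str(domain or "").strip().lower()
--         if not key:
--             continue
--         canonical = _DOMAIN_ALIASES.get(key, key)
--         scores[canonical] = scores.get(canonical, 0) + _KEY_WEIGHTS.get(key, 1)
--
--     best = None  # (domain, weight, priority) kept so far
--     for dom, weight in scores.items():
--         prio = _DOMAIN_PRIORITY.get(dom, 0)
--         if best is None or weight > best[1] or (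
--             weight == best[1] and (prio > best[2] or (prio == best[2] and dom < best[0]))
--         ):
--             best = (dom, weight, prio)
--     return best[0] if best else None
-- ===== Notes on version B (the rewrite author's own statement) =====
-- stated objective: simpler
-- what changed: B keeps the scoring accumulation but replaces sorted(items, key=(-weight,-priority,domain))[0] by a single running-best selection pass over scores.items(), and drops the empty-scores canonicalize fallback, which provably always yields None because scores is empty exactly when every entry normalizes to the empty string.
import Mathlib
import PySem

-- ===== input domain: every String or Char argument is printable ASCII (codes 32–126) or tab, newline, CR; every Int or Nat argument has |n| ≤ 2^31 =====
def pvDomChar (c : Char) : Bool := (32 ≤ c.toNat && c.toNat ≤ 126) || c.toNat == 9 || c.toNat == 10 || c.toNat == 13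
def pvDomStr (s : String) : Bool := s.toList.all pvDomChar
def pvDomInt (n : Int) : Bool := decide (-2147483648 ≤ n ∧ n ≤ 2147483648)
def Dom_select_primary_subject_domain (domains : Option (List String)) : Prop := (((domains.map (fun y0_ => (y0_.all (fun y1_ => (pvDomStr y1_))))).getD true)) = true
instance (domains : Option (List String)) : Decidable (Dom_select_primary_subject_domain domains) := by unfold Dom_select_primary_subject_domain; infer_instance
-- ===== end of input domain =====

-- B replaces A's build-and-sort of the score table by a single running-best selection pass
-- (and drops the dead canonicalize fallback, which can only ever yield None); objective: simpler.

-- ===== PORT A =====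
-- _CANONICAL_DOMAIN_ALIASES
def pvAliasesA : PySem.Dict String String := PySem.Dict.mk
  [("digital", "tech"), ("software", "ai"), ("coding", "ai"), ("gear", "edc"),
   ("knife", "edc"), ("flashlight", "edc"), ("lighter", "edc"), ("toy", "edc"),
   ("bag", "functional"), ("functional_wear", "functional"), ("tool", "tools")]

-- normalize_subject_domain(value)
def normalize_subject_domain (value : Option String) : Option String :=
  let normalized := PySem.Str.lower (PySem.Str.strip (value.getD ""))
  if normalized = "" then none
  else some (pvAliasesA.getD normalized normalized)

-- canonicalize_domains(domains)
def canonicalize_domains (domains : Option (List String)) : List String :=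
  let st := (domains.getD []).foldl
    (fun (st : List String × PySem.Set String) domain =>
      match normalize_subject_domain (some domain) with
      | none => st
      | some canonical =>
          if st.2.contains canonical then st
          else (st.1 ++ [canonical], st.2.add canonical))
    ([], PySem.Set.empty)
  let st := if st.2.contains "functional"
    then (st.1.filter (fun d => !(d == "edc")), st.2.discard "edc") else st
  let st := if st.2.contains "tools"
    then (st.1.filter (fun d => !(d == "edc")), st.2.discard "edc") else st
  st.1

-- the weight if/elif chain of A's loop body (membership in a set literal = List.contains)
def pvWeightA (normalized : String) : Int :=
  if ["bag", "functional_wear"].contains normalized then 4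
  else if ["tools", "tool"].contains normalized then 4
  else if ["ai", "coding", "software"].contains normalized then 4
  else if ["tech", "digital"].contains normalized then 4
  else if ["outdoor", "tactical"].contains normalized then 3
  else if ["knife", "flashlight", "lighter", "toy", "edc"].contains normalized then 3
  else if normalized == "gear" then 1
  else 1

-- the priority dict of A
def pvPriorityA : PySem.Dict String Int := PySem.Dict.mk
  [("functional", 6), ("tools", 5), ("ai", 4), ("tech", 3), ("edc", 3),
   ("outdoor", 2), ("food", 1), ("travel", 1), ("finance", 1), ("news", 1), ("sports", 1)]

-- the body of A's scoring loop (one iteration of 'for domain in domains or []')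
def pvStepA : PySem.Dict String Int → String → PySem.Dict String Int := fun scores domain =>
  let normalized := PySem.Str.lower (PySem.Str.strip domain)  -- str(domain or "").strip().lower()
  match normalize_subject_domain (some normalized) with       -- 'if not canonical: continue'
  | none => scores
  | some canonical => scores.insert canonical (scores.getD canonical 0 + pvWeightA normalized)

-- the sort key: lambda item: (-item[1], -priority.get(item[0], 0), item[0])  (tuples compare lexicographically)
def pvRankKeyA (item : String × Int) : Lex (Int × Lex (Int × String)) :=
  toLex ((-item.2 : Int), toLex ((-(pvPriorityA.getD item.1 0) : Int), item.1))

def select_primary_subject_domain (domains : Option (List String)) : Option String :=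
  let scores : PySem.Dict String Int := (domains.getD []).foldl pvStepA PySem.Dict.empty
  if scores.items = [] then      -- 'if not scores'
    match canonicalize_domains domains with   -- 'canonical[0] if canonical else None'
    | [] => none
    | c :: _ => some c
  else
    -- ranked = sorted(scores.items(), key=...); return ranked[0][0]
    match PySem.List.sorted scores.items pvRankKeyA false with
    | p :: _ => some p.1
    | [] => none      -- unreachable: scores is nonempty here

-- ===== PORT B =====
def pvAliasesB : PySem.Dict String String := PySem.Dict.mk
  [("digital", "tech"), ("software", "ai"), ("coding", "ai"), ("gear", "edc"),
   ("knife", "edc"), ("flashlight", "edc"), ("lighter", "edc"), ("toy", "edc"),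
   ("bag", "functional"), ("functional_wear", "functional"), ("tool", "tools")]

def pvKeyWeightsB : PySem.Dict String Int := PySem.Dict.mk
  [("bag", 4), ("functional_wear", 4), ("tools", 4), ("tool", 4),
   ("ai", 4), ("coding", 4), ("software", 4), ("tech", 4), ("digital", 4),
   ("outdoor", 3), ("tactical", 3), ("knife", 3), ("flashlight", 3), ("lighter", 3),
   ("toy", 3), ("edc", 3)]

def pvPriorityB : PySem.Dict String Int := PySem.Dict.mk
  [("functional", 6), ("tools", 5), ("ai", 4), ("tech", 3), ("edc", 3),
   ("outdoor", 2), ("food", 1), ("travel", 1), ("finance", 1), ("news", 1), ("sports", 1)]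

-- the body of B's scoring loop
def pvStepB : PySem.Dict String Int → String → PySem.Dict String Int := fun scores domain =>
  let key := PySem.Str.lower (PySem.Str.strip domain)
  if key = "" then scores         -- 'if not key: continue'
  else
    let canonical := pvAliasesB.getD key key
    scores.insert canonical (scores.getD canonical 0 + pvKeyWeightsB.getD key 1)

-- the body of B's selection loop: keep the better of the running best and the candidate
def pvSelStep : Option (String × Int × Int) → (String × Int) → Option (String × Int × Int) := fun best p =>
  let prio := pvPriorityB.getD p.1 0
  match best with
  | none => some (p.1, p.2, prio)
  | some (bd, bw, bp) =>
      if p.2 > bw ∨ (p.2 = bw ∧ (prio > bp ∨ (prio = bp ∧ p.1 < bd)))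
      then some (p.1, p.2, prio) else some (bd, bw, bp)

def select_primary_subject_domain_alt (domains : Option (List String)) : Option String :=
  let scores : PySem.Dict String Int := (domains.getD []).foldl pvStepB PySem.Dict.empty
  let best := scores.items.foldl pvSelStep none
  best.map (·.1)

-- ===== PRECONDITION & SPEC =====
def Spec_select_primary_subject_domain (domains : Option (List String)) (out : Option String) : Prop := out = select_primary_subject_domain_alt domains
instance (domains : Option (List String)) (out : Option String) : Decidable (Spec_select_primary_subject_domain domains out) := by unfold Spec_select_primary_subject_domain; infer_instance

-- ===== CLAIM (what is proved, stated in full; the proofs are below) =====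
def Claim_equal_select_primary_subject_domain : Prop := ∀ (domains : Option (List String)), Dom_select_primary_subject_domain domains → Spec_select_primary_subject_domain domains (select_primary_subject_domain domains)

-- ===== LEMMAS AND PROOFS =====

-- ---------- character facts ----------
lemma pv_upper_bounds {c : Char} (h : PySem.Chars.isupper c = true) :
    65 ≤ c.toNat ∧ c.toNat ≤ 90 := by
  simp [PySem.Chars.isupper] at h
  have h1 : ('A').val.toNat ≤ c.val.toNat := UInt32.le_iff_toNat_le.mp (Char.le_def.mp h.1)
  have h2 : c.val.toNat ≤ ('Z').val.toNat := UInt32.le_iff_toNat_le.mp (Char.le_def.mp h.2)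
  exact ⟨h1, h2⟩

lemma pv_toNat_lowerChar {c : Char} (h : PySem.Chars.isupper c = true) :
    (PySem.Chars.lowerChar c).toNat = c.toNat + 32 := by
  have hb := pv_upper_bounds h
  have hv : (c.toNat + 32).isValidChar := Or.inl (by omega)
  simp only [PySem.Chars.lowerChar, h, if_true]
  first
  | exact Char.toNat_ofNat hv
  | exact Char.toNat_ofNat _ hv
  | exact Char.toNat_ofNat _
  | simp [Char.ofNat, hv]

lemma pv_isspace_false {c : Char} (h65 : 65 ≤ c.toNat) (h122 : c.toNat ≤ 122) :
    PySem.Chars.isspace c = false := by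
  simp [PySem.Chars.isspace]
  omega

lemma pv_lowerChar_of_not_upper {c : Char} (h : PySem.Chars.isupper c = false) :
    PySem.Chars.lowerChar c = c := by
  simp [PySem.Chars.lowerChar, h]

lemma pv_lc_isspace (c : Char) :
    PySem.Chars.isspace (PySem.Chars.lowerChar c) = PySem.Chars.isspace c := by
  by_cases h : PySem.Chars.isupper c = true
  · have hb := pv_upper_bounds h
    have ht := pv_toNat_lowerChar h
    rw [pv_isspace_false (by omega) (by omega), pv_isspace_false (by omega) (by omega)]
  · rw [pv_lowerChar_of_not_upper (by simpa using h)]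

lemma pv_isupper_lowerChar (c : Char) :
    PySem.Chars.isupper (PySem.Chars.lowerChar c) = false := by
  by_cases h : PySem.Chars.isupper c = true
  · have hb := pv_upper_bounds h
    have ht := pv_toNat_lowerChar h
    rw [Bool.eq_false_iff]
    intro hc
    have := pv_upper_bounds hc
    omega
  · rw [pv_lowerChar_of_not_upper (by simpa using h)]
    simpa using h

lemma pv_lc_idem (c : Char) :
    PySem.Chars.lowerChar (PySem.Chars.lowerChar c) = PySem.Chars.lowerChar c :=
  pv_lowerChar_of_not_upper (pv_isupper_lowerChar c)

-- ---------- list-of-chars facts ----------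
lemma pv_lower_idem (cs : List Char) :
    PySem.Chars.lower (PySem.Chars.lower cs) = PySem.Chars.lower cs := by
  simp only [PySem.Chars.lower, List.map_map]
  exact List.map_congr_left (fun c _ => by simp [Function.comp, pv_lc_idem])

lemma pv_lower_reverse (l : List Char) :
    (PySem.Chars.lower l).reverse = PySem.Chars.lower l.reverse := by
  unfold PySem.Chars.lower
  simp

lemma pv_dropWhile_lower (cs : List Char) :
    List.dropWhile PySem.Chars.isspace (PySem.Chars.lower cs) =
      PySem.Chars.lower (List.dropWhile PySem.Chars.isspace cs) := by
  have hk : (PySem.Chars.isspace ∘ PySem.Chars.lowerChar) = PySem.Chars.isspace :=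
    funext pv_lc_isspace
  simp only [PySem.Chars.lower, List.dropWhile_map, hk]

lemma pv_lstrip_lower (cs : List Char) :
    PySem.Chars.lstrip (PySem.Chars.lower cs) = PySem.Chars.lower (PySem.Chars.lstrip cs) := by
  simp only [PySem.Chars.lstrip, pv_dropWhile_lower]

lemma pv_rstrip_lower (cs : List Char) :
    PySem.Chars.rstrip (PySem.Chars.lower cs) = PySem.Chars.lower (PySem.Chars.rstrip cs) := by
  unfold PySem.Chars.rstrip
  rw [pv_lower_reverse cs, pv_dropWhile_lower, pv_lower_reverse]

lemma pv_strip_lower (cs : List Char) :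
    PySem.Chars.strip (PySem.Chars.lower cs) = PySem.Chars.lower (PySem.Chars.strip cs) := by
  simp only [PySem.Chars.strip, pv_lstrip_lower, pv_rstrip_lower]

lemma pv_dropWhile_idem (p : Char → Bool) (l : List Char) :
    List.dropWhile p (List.dropWhile p l) = List.dropWhile p l := by
  induction l with
  | nil => rfl
  | cons a t ih =>
    by_cases h : p a = true
    · simp [h, ih]
    · simp [h]

lemma pv_lstrip_idem (l : List Char) :
    PySem.Chars.lstrip (PySem.Chars.lstrip l) = PySem.Chars.lstrip l := by
  simp only [PySem.Chars.lstrip, pv_dropWhile_idem]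

lemma pv_rstrip_idem (l : List Char) :
    PySem.Chars.rstrip (PySem.Chars.rstrip l) = PySem.Chars.rstrip l := by
  simp only [PySem.Chars.rstrip, List.reverse_reverse, pv_dropWhile_idem]

lemma pv_dropWhile_append_left (p : Char → Bool) (a b : List Char)
    (h : List.dropWhile p (a ++ b) = a ++ b) : List.dropWhile p a = a := by
  cases a with
  | nil => simp
  | cons x ta =>
    have hx : p x = false := by
      by_contra hpx
      have hpx' : p x = true := by simpa using hpx
      have hlen := congrArg List.length h
      have hle := List.length_dropWhile_le p (ta ++ b)
      simp [hpx'] at hlen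
      simp at hle
      omega
    simp [hx]

lemma pv_rstrip_prefix (y : List Char) : PySem.Chars.rstrip y <+: y := by
  unfold PySem.Chars.rstrip
  have hs : List.dropWhile PySem.Chars.isspace y.reverse <:+ y.reverse :=
    List.dropWhile_suffix _
  have hp := List.reverse_prefix.mpr hs
  rwa [List.reverse_reverse] at hp

lemma pv_lstrip_rstrip (y : List Char) (h : PySem.Chars.lstrip y = y) :
    PySem.Chars.lstrip (PySem.Chars.rstrip y) = PySem.Chars.rstrip y := by
  obtain ⟨t, ht⟩ := pv_rstrip_prefix y
  unfold PySem.Chars.lstrip at *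
  rw [← ht] at h
  exact pv_dropWhile_append_left _ _ _ h

lemma pv_strip_idem (cs : List Char) :
    PySem.Chars.strip (PySem.Chars.strip cs) = PySem.Chars.strip cs := by
  show PySem.Chars.rstrip (PySem.Chars.lstrip (PySem.Chars.strip cs)) = PySem.Chars.strip cs
  rw [show PySem.Chars.strip cs = PySem.Chars.rstrip (PySem.Chars.lstrip cs) from rfl,
    pv_lstrip_rstrip _ (pv_lstrip_idem cs), pv_rstrip_idem]

-- the composite 'str(x).strip().lower()' is idempotent
lemma pv_norm_idem (s : String) :
    PySem.Str.lower (PySem.Str.strip (PySem.Str.lower (PySem.Str.strip s))) =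
      PySem.Str.lower (PySem.Str.strip s) := by
  simp only [PySem.Str.lower, PySem.Str.strip, String.toList_ofList]
  rw [pv_strip_lower, pv_lower_idem, pv_strip_idem]

-- ---------- the per-element step functions agree ----------
lemma pv_weight_eq (s : String) : pvWeightA s = pvKeyWeightsB.getD s 1 := by
  rcases eq_or_ne s "bag" with h | hbag; · subst h; rfl
  rcases eq_or_ne s "functional_wear" with h | hfw; · subst h; rfl
  rcases eq_or_ne s "tools" with h | htools; · subst h; rfl
  rcases eq_or_ne s "tool" with h | htool; · subst h; rfl
  rcases eq_or_ne s "ai" with h | hai; · subst h; rfl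
  rcases eq_or_ne s "coding" with h | hcoding; · subst h; rfl
  rcases eq_or_ne s "software" with h | hsoftware; · subst h; rfl
  rcases eq_or_ne s "tech" with h | htech; · subst h; rfl
  rcases eq_or_ne s "digital" with h | hdigital; · subst h; rfl
  rcases eq_or_ne s "outdoor" with h | houtdoor; · subst h; rfl
  rcases eq_or_ne s "tactical" with h | htactical; · subst h; rfl
  rcases eq_or_ne s "knife" with h | hknife; · subst h; rfl
  rcases eq_or_ne s "flashlight" with h | hflash; · subst h; rfl
  rcases eq_or_ne s "lighter" with h | hlighter; · subst h; rfl
  rcases eq_or_ne s "toy" with h | htoy; · subst h; rfl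
  rcases eq_or_ne s "edc" with h | hedc; · subst h; rfl
  rcases eq_or_ne s "gear" with h | hgear; · subst h; rfl
  unfold pvWeightA pvKeyWeightsB
  simp [PySem.Dict.getD_eq_get?_getD, PySem.Dict.get?,
    hbag, hfw, htools, htool, hai, hcoding, hsoftware, htech, hdigital, houtdoor,
    htactical, hknife, hflash, hlighter, htoy, hedc, hgear,
    Ne.symm hbag, Ne.symm hfw, Ne.symm htools, Ne.symm htool, Ne.symm hai, Ne.symm hcoding,
    Ne.symm hsoftware, Ne.symm htech, Ne.symm hdigital, Ne.symm houtdoor, Ne.symm htactical,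
    Ne.symm hknife, Ne.symm hflash, Ne.symm hlighter, Ne.symm htoy, Ne.symm hedc]

lemma pv_step_eq : pvStepA = pvStepB := by
  funext d s
  unfold pvStepA pvStepB normalize_subject_domain
  simp only [Option.getD_some]
  rw [pv_norm_idem]
  by_cases h : PySem.Str.lower (PySem.Str.strip s) = ""
  · simp [h]
  · rw [if_neg h, if_neg h, pv_weight_eq]
    rfl

-- ---------- the empty-scores branch ----------
lemma pv_insert_items_ne_nil (d : PySem.Dict String Int) (k : String) (v : Int) :
    (d.insert k v).items ≠ [] := by
  unfold PySem.Dict.insert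
  by_cases hc : d.contains k = true
  · simp only [hc, if_true]
    intro hnil
    have hd : d.items = [] := by simpa using congrArg List.length hnil
    simp [PySem.Dict.contains, hd] at hc
  · simp [hc]

lemma pv_fold_empty (l : List String) (d : PySem.Dict String Int)
    (h : (l.foldl pvStepB d).items = []) :
    d.items = [] ∧ ∀ s ∈ l, PySem.Str.lower (PySem.Str.strip s) = "" := by
  induction l generalizing d with
  | nil => exact ⟨h, by simp⟩
  | cons a t ih =>
    rw [List.foldl_cons] at h
    by_cases ha : PySem.Str.lower (PySem.Str.strip a) = ""
    · have hstep : pvStepB d a = d := by simp [pvStepB, ha]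
      rw [hstep] at h
      obtain ⟨hd, hall⟩ := ih d h
      refine ⟨hd, ?_⟩
      intro s hs
      rcases List.mem_cons.mp hs with hs | hs
      · exact hs ▸ ha
      · exact hall s hs
    · exact absurd (by simpa [pvStepB, ha] using (ih _ h).1)
        (pv_insert_items_ne_nil _ _ _)

lemma pv_canon_fold_nil (l : List String)
    (hall : ∀ s ∈ l, PySem.Str.lower (PySem.Str.strip s) = "") :
    l.foldl
      (fun (st : List String × PySem.Set String) domain =>
        match normalize_subject_domain (some domain) with
        | none => st
        | some canonical =>
            if st.2.contains canonical then st
            else (st.1 ++ [canonical], st.2.add canonical))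
      ([], PySem.Set.empty) = ([], PySem.Set.empty) := by
  induction l with
  | nil => rfl
  | cons a t ih =>
    have hna : normalize_subject_domain (some a) = none := by
      simp [normalize_subject_domain, hall a (by simp)]
    rw [List.foldl_cons]
    simp only [hna]
    exact ih (fun s hs => hall s (by simp [hs]))

lemma pv_canonicalize_nil (domains : Option (List String))
    (hall : ∀ s ∈ domains.getD [], PySem.Str.lower (PySem.Str.strip s) = "") :
    canonicalize_domains domains = [] := by
  unfold canonicalize_domains
  rw [pv_canon_fold_nil _ hall]
  simp [PySem.Set.contains, PySem.Set.empty]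

-- ---------- the selection pass vs. the sort ----------
lemma pv_key_inj : Function.Injective pvRankKeyA := by
  intro p q h
  simp only [pvRankKeyA, toLex_inj, Prod.mk.injEq] at h
  obtain ⟨hw, hp, hd⟩ := h
  exact Prod.ext hd (by omega)

lemma pv_cond_iff (p : String × Int) (bd : String) (bw : Int) :
    (p.2 > bw ∨ (p.2 = bw ∧ (pvPriorityB.getD p.1 0 > pvPriorityB.getD bd 0 ∨
      (pvPriorityB.getD p.1 0 = pvPriorityB.getD bd 0 ∧ p.1 < bd))))
      ↔ pvRankKeyA p < pvRankKeyA (bd, bw) := by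
  simp only [pvRankKeyA]
  rw [show pvPriorityA = pvPriorityB from rfl]
  rw [Prod.Lex.toLex_lt_toLex, Prod.Lex.toLex_lt_toLex]
  constructor
  · rintro (h | ⟨hw, (h | ⟨hp, hd⟩)⟩)
    · exact Or.inl (by omega)
    · exact Or.inr ⟨by omega, Or.inl (by omega)⟩
    · exact Or.inr ⟨by omega, Or.inr ⟨by omega, hd⟩⟩
  · rintro (h | ⟨hw, (h | ⟨hp, hd⟩)⟩)
    · exact Or.inl (by omega)
    · exact Or.inr ⟨by omega, Or.inl (by omega)⟩
    · exact Or.inr ⟨by omega, Or.inr ⟨by omega, hd⟩⟩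

lemma pv_fold_min (l : List (String × Int)) :
    ∀ q : String × Int, ∃ m : String × Int,
      l.foldl pvSelStep (some (q.1, q.2, pvPriorityB.getD q.1 0)) =
        some (m.1, m.2, pvPriorityB.getD m.1 0) ∧
      (m = q ∨ m ∈ l) ∧ pvRankKeyA m ≤ pvRankKeyA q ∧ ∀ y ∈ l, pvRankKeyA m ≤ pvRankKeyA y := by
  induction l with
  | nil =>
    intro q
    exact ⟨q, rfl, Or.inl rfl, le_refl _, by simp⟩
  | cons x t ih =>
    intro q
    rw [List.foldl_cons]
    by_cases hc : pvRankKeyA x < pvRankKeyA (q.1, q.2)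
    · have hstep : pvSelStep (some (q.1, q.2, pvPriorityB.getD q.1 0)) x =
          some (x.1, x.2, pvPriorityB.getD x.1 0) := by
        simp only [pvSelStep]
        rw [if_pos ((pv_cond_iff x q.1 q.2).mpr hc)]
      rw [hstep]
      obtain ⟨m, hfold, hmem, hle, hall⟩ := ih x
      refine ⟨m, hfold, ?_, ?_, ?_⟩
      · rcases hmem with h | h
        · exact Or.inr (h ▸ List.mem_cons_self)
        · exact Or.inr (List.mem_cons_of_mem _ h)
      · exact le_trans hle (le_of_lt hc)
      · intro y hy
        rcases List.mem_cons.mp hy with hy | hy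
        · exact hy ▸ hle
        · exact hall y hy
    · have hstep : pvSelStep (some (q.1, q.2, pvPriorityB.getD q.1 0)) x =
          some (q.1, q.2, pvPriorityB.getD q.1 0) := by
        simp only [pvSelStep]
        rw [if_neg (fun hcc => hc ((pv_cond_iff x q.1 q.2).mp hcc))]
      rw [hstep]
      obtain ⟨m, hfold, hmem, hle, hall⟩ := ih q
      refine ⟨m, hfold, ?_, hle, ?_⟩
      · rcases hmem with h | h
        · exact Or.inl h
        · exact Or.inr (List.mem_cons_of_mem _ h)
      intro y hy
      rcases List.mem_cons.mp hy with hy | hy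
      · have hqx : pvRankKeyA (q.1, q.2) ≤ pvRankKeyA x := le_of_not_gt hc
        exact hy ▸ le_trans hle hqx
      · exact hall y hy

-- ===== VERDICT (by name: the statement is the Claim_ definition above) =====
theorem select_primary_subject_domain_spec : Claim_equal_select_primary_subject_domain := by
  intro domains _hdom
  unfold Spec_select_primary_subject_domain
  simp only [select_primary_subject_domain, select_primary_subject_domain_alt]
  rw [pv_step_eq]
  cases hS : ((domains.getD []).foldl pvStepB PySem.Dict.empty).items with
  | nil =>
    have hall := (pv_fold_empty _ _ hS).2
    rw [if_pos rfl, pv_canonicalize_nil domains hall]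
    rfl
  | cons p t =>
    rw [if_neg (by simp)]
    rw [List.foldl_cons]
    have hstep1 : pvSelStep none p = some (p.1, p.2, pvPriorityB.getD p.1 0) := rfl
    rw [hstep1]
    obtain ⟨m, hfold, hmem, hle, hall⟩ := pv_fold_min t p
    rw [hfold]
    have hmin : ∀ y ∈ p :: t, pvRankKeyA m ≤ pvRankKeyA y := by
      intro y hy
      rcases List.mem_cons.mp hy with hy | hy
      · exact hy ▸ hle
      · exact hall y hy
    have hmeml : m ∈ p :: t := by
      rcases hmem with h | h
      · exact h ▸ List.mem_cons_self
      · exact List.mem_cons_of_mem _ h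
    cases hr : PySem.List.sorted (p :: t) pvRankKeyA false with
    | nil => exact absurd hr (by simp [PySem.List.sorted_eq_nil_iff])
    | cons q t' =>
      have hqmem : q ∈ p :: t := by
        have hq : q ∈ PySem.List.sorted (p :: t) pvRankKeyA false := by
          rw [hr]; exact List.mem_cons_self
        exact (PySem.List.mem_sorted _ _ _ _).mp hq
      have hqmin : ∀ y ∈ p :: t, pvRankKeyA q ≤ pvRankKeyA y :=
        PySem.List.key_head_sorted_le (p :: t) pvRankKeyA hr
      have heq : pvRankKeyA m = pvRankKeyA q := le_antisymm (hmin q hqmem) (hqmin m hmeml)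
      have hmq : m = q := pv_key_inj heq
      simp [hmq]
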